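-- pv_equiv track=rewrite | github.com/taxijjang/algorithm | 2024kakao/주사위고르기.py | compare_count
-- ===== SOURCE A (Python) =====
-- from collections import Counter, defaultdict, OrderedDict
--
-- def compare_count(a: Counter, b: Counter):
--     a = OrderedDict(a)
--     b = OrderedDict(b)
--     win_draw_lose = defaultdict(int)
--     for a_key, a_value in a.items():
--         for b_key, b_value in b.items():
--             if a_key > b_key:
--                 win_draw_lose["win"] += b_value * a_value
--     return win_draw_lose
-- ===== SOURCE B (Python) =====
-- def compare_count(a, b):
--     pairs = sorted(b.items(), key=lambda kv: kv[0])
--     prefix = [0]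
--     running = 0
--     for _, v in pairs:
--         running += v
--         prefix.append(running)
--     total = 0
--     for key, weight in a.items():
--         lo, hi = 0, len(pairs)
--         while lo < hi:
--             mid = (lo + hi) // 2
--             if pairs[mid][0] < key:
--                 lo = mid + 1
--             else:
--                 hi = mid
--         total += weight * prefix[lo]
--     return {"win": total}
-- ===== Notes on version B (the rewrite author's own statement) =====
-- stated objective: faster
-- what changed: Replaces the nested scan over all key pairs by sorting b's items, prefix-summing their values, and binary-searching each a-key's threshold; Pre_ additionally requires distinct keys within each association list, which is automatic for the Python dict arguments (duplicate keys cannot occur in a dict).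
-- intended difference: On inputs where no a-key exceeds any b-key, A returns an empty dict (the defaultdict was never touched) while B returns {'win': 0}; an explicit zero win count is the intended value for a weighted pair count. — e.g. on compare_count([(0, 1)], [(1, 2)]): A returns [], B returns [("win", 0)]
import Mathlib
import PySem

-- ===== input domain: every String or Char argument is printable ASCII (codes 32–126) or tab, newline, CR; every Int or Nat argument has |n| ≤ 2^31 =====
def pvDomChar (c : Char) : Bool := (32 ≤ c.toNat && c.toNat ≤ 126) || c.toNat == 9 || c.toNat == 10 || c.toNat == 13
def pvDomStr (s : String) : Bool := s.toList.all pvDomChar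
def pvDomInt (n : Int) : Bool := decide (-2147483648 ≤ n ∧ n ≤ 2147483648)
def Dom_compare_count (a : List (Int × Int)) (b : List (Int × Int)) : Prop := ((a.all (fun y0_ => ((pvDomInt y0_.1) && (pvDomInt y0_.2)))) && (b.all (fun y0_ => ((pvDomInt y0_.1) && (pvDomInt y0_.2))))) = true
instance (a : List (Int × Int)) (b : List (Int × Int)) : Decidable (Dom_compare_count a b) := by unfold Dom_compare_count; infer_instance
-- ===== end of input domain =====

-- B sorts b's items, prefix-sums their values and binary-searches each a-key's threshold
-- (O((|a|+|b|) log |b|) instead of A's O(|a|*|b|)); B always reports an explicit "win" count.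


-- ===== PORT A =====
def compare_count (a : List (Int × Int)) (b : List (Int × Int)) : List (String × Int) :=
  -- a = OrderedDict(a); b = OrderedDict(b)
  let ad : PySem.Dict Int Int := a.foldl (fun d p => d.insert p.1 p.2) PySem.Dict.empty
  let bd : PySem.Dict Int Int := b.foldl (fun d p => d.insert p.1 p.2) PySem.Dict.empty
  -- win_draw_lose = defaultdict(int); nested for-loops; defaultdict access = modify with default 0
  let wdl : PySem.Dict String Int :=
    ad.items.foldl (fun w p =>
      bd.items.foldl (fun w q =>
        if p.1 > q.1 then w.modify "win" 0 (fun t => t + q.2 * p.2) else w) w)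
      PySem.Dict.empty
  wdl.items

-- ===== PORT B =====
-- the hand-written bisect loop of Source B (while lo < hi …); pairs[mid] is always in range,
-- so pyGetD with a dummy default is exact here
def bsearchGo (pairs : List (Int × Int)) (key : Int) : Nat → Nat → Nat → Nat
  | 0, lo, _ => lo
  | n + 1, lo, hi =>
    if lo < hi then
      let mid := (lo + hi) / 2
      if (PySem.List.pyGetD pairs (mid : Int) (0, 0)).1 < key then
        bsearchGo pairs key n (mid + 1) hi
      else
        bsearchGo pairs key n lo mid
    else lo

-- the while loop runs at most hi - lo times, so that fuel makes it total
def bsearchLoop (pairs : List (Int × Int)) (key : Int) (lo hi : Nat) : Nat :=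
  bsearchGo pairs key (hi - lo) lo hi

def compare_count_alt (a : List (Int × Int)) (b : List (Int × Int)) : List (String × Int) :=
  let pairs := PySem.List.sorted b (fun kv => kv.1)
  let pr := pairs.foldl (fun (s : List Int × Int) q => (s.1 ++ [s.2 + q.2], s.2 + q.2)) ([0], 0)
  let total := a.foldl
    (fun t p => t + p.2 * PySem.List.pyGetD pr.1 ((bsearchLoop pairs p.1 0 pairs.length : Nat) : Int) 0) 0
  [("win", total)]

-- ===== PRECONDITION & SPEC =====
-- Pre_ requires the keys within each association list to be distinct: the Python arguments are
-- dicts, which cannot carry duplicate keys; on duplicate-key lists OrderedDict's overwrite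
-- behaviour (kept by A's port) is not dict input behaviour, and B reads the list directly.
def Pre_compare_count (a : List (Int × Int)) (b : List (Int × Int)) : Prop :=
  (a.map Prod.fst).Nodup ∧ (b.map Prod.fst).Nodup
instance (a : List (Int × Int)) (b : List (Int × Int)) : Decidable (Pre_compare_count a b) := by
  unfold Pre_compare_count; infer_instance
def pvWitness_compare_count : (List (Int × Int)) × (List (Int × Int)) := ([(3, 2), (1, 1)], [(2, 5)])

-- On inputs where no a-key exceeds any b-key, A returns an empty dict (the defaultdict was never
-- touched) while B returns {"win": 0}; an explicit zero count is the intended value here.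
def D_compare_count (a : List (Int × Int)) (b : List (Int × Int)) : Prop :=
  ∀ p ∈ a, ∀ q ∈ b, ¬ q.1 < p.1
instance (a : List (Int × Int)) (b : List (Int × Int)) : Decidable (D_compare_count a b) := by
  unfold D_compare_count; infer_instance

def Spec_compare_count (a : List (Int × Int)) (b : List (Int × Int)) (out : List (String × Int)) : Prop :=
  ¬ D_compare_count a b → out = compare_count_alt a b
instance (a : List (Int × Int)) (b : List (Int × Int)) (out : List (String × Int)) : Decidable (Spec_compare_count a b out) := by
  unfold Spec_compare_count; infer_instance

def pvDiffWitness_compare_count : (List (Int × Int)) × (List (Int × Int)) := ([(0, 1)], [(1, 2)])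
def pvDiffWitnessOut_compare_count : (List (String × Int)) × (List (String × Int)) :=
  ([], [("win", 0)])

-- ===== CLAIM (what is proved, stated in full; the proofs are below) =====
def Claim_unchanged_compare_count : Prop := ∀ (a : List (Int × Int)) (b : List (Int × Int)), Dom_compare_count a b → Pre_compare_count a b → Spec_compare_count a b (compare_count a b)
def Claim_changed_compare_count : Prop := Dom_compare_count (pvDiffWitness_compare_count.1) (pvDiffWitness_compare_count.2) ∧ Pre_compare_count (pvDiffWitness_compare_count.1) (pvDiffWitness_compare_count.2) ∧ D_compare_count (pvDiffWitness_compare_count.1) (pvDiffWitness_compare_count.2) ∧ compare_count (pvDiffWitness_compare_count.1) (pvDiffWitness_compare_count.2) = pvDiffWitnessOut_compare_count.1 ∧ compare_count_alt (pvDiffWitness_compare_count.1) (pvDiffWitness_compare_count.2) = pvDiffWitnessOut_compare_count.2 ∧ pvDiffWitnessOut_compare_count.1 ≠ pvDiffWitnessOut_compare_count.2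
def Claim_exact_compare_count : Prop := ∀ (a : List (Int × Int)) (b : List (Int × Int)), Dom_compare_count a b → Pre_compare_count a b → D_compare_count a b → compare_count a b ≠ compare_count_alt a b

-- ===== LEMMAS AND PROOFS =====

-- the weighted win contribution of one a-item p against b
def winSum (b : List (Int × Int)) (p : Int × Int) : Int :=
  ((b.filter (fun q => decide (q.1 < p.1))).map (fun q => q.2 * p.2)).sum

-- OrderedDict of an association list with distinct keys has exactly that items list
theorem dict_items_of_nodup (l : List (Int × Int)) (h : (l.map Prod.fst).Nodup) :
    (l.foldl (fun d p => d.insert p.1 p.2) (PySem.Dict.empty : PySem.Dict Int Int)).items = l := by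
  have := PySem.Dict.items_foldl_insert_fresh (ν := Int) l Prod.fst Prod.snd PySem.Dict.empty
    (by intro p _; rfl) h
  simpa using this

-- a conditional fold is the fold over the filtered list
theorem foldl_dif_eq_filter {α γ : Type} (L : List α) (c : α → Prop) [DecidablePred c]
    (g : γ → α → γ) (d : γ) :
    L.foldl (fun d x => if c x then g d x else d) d = (L.filter (fun x => decide (c x))).foldl g d := by
  induction L generalizing d with
  | nil => rfl
  | cons x t ih => by_cases h : c x <;> simp [h, ih]

-- folding the "win" modify over a list, starting from a singleton "win" dict
theorem winfold_singleton (L : List (Int × Int)) (v : (Int × Int) → Int) :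
    ∀ s : Int, L.foldl (fun (w : PySem.Dict String Int) x => w.modify "win" 0 (fun t => t + v x))
        (PySem.Dict.mk [("win", s)]) = PySem.Dict.mk [("win", s + (L.map v).sum)] := by
  induction L with
  | nil => intro s; simp
  | cons x L ih =>
      intro s
      have hstep : (PySem.Dict.mk [("win", s)] : PySem.Dict String Int).modify "win" 0
          (fun t => t + v x) = PySem.Dict.mk [("win", s + v x)] := by
        simp [PySem.Dict.modify, PySem.Dict.insert, PySem.Dict.getD, PySem.Dict.get?,
          PySem.Dict.contains]
      rw [List.foldl_cons, hstep, ih (s + v x)]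
      have h2 : s + v x + (L.map v).sum = s + ((x :: L).map v).sum := by simp; ring
      rw [h2]

-- the same fold from the untouched (empty) dict, when the list is nonempty
theorem winfold_empty (L : List (Int × Int)) (v : (Int × Int) → Int) (hL : L ≠ []) :
    L.foldl (fun (w : PySem.Dict String Int) x => w.modify "win" 0 (fun t => t + v x))
        PySem.Dict.empty = PySem.Dict.mk [("win", (L.map v).sum)] := by
  cases L with
  | nil => exact absurd rfl hL
  | cons x L =>
      have hstep : (PySem.Dict.empty : PySem.Dict String Int).modify "win" 0
          (fun t => t + v x) = PySem.Dict.mk [("win", v x)] := by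
        simp [PySem.Dict.modify, PySem.Dict.insert, PySem.Dict.getD, PySem.Dict.get?,
          PySem.Dict.contains, PySem.Dict.empty]
      rw [List.foldl_cons, hstep, winfold_singleton L v (v x)]
      simp

-- A's inner loop over b, from a singleton "win" state
theorem inner_fold_singleton (b : List (Int × Int)) (p : Int × Int) (s : Int) :
    b.foldl (fun (w : PySem.Dict String Int) q =>
        if p.1 > q.1 then w.modify "win" 0 (fun t => t + q.2 * p.2) else w)
      (PySem.Dict.mk [("win", s)]) = PySem.Dict.mk [("win", s + winSum b p)] := by
  rw [foldl_dif_eq_filter b (fun q => p.1 > q.1)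
    (fun (w : PySem.Dict String Int) q => w.modify "win" 0 (fun t => t + q.2 * p.2))]
  exact winfold_singleton _ _ s

-- A's inner loop over b, from the untouched dict, when some b-item wins
theorem inner_fold_empty (b : List (Int × Int)) (p : Int × Int)
    (h : b.filter (fun q => decide (q.1 < p.1)) ≠ []) :
    b.foldl (fun (w : PySem.Dict String Int) q =>
        if p.1 > q.1 then w.modify "win" 0 (fun t => t + q.2 * p.2) else w)
      PySem.Dict.empty = PySem.Dict.mk [("win", winSum b p)] := by
  rw [foldl_dif_eq_filter b (fun q => p.1 > q.1)
    (fun (w : PySem.Dict String Int) q => w.modify "win" 0 (fun t => t + q.2 * p.2))]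
  exact winfold_empty _ _ h

-- A's inner loop over b, from the untouched dict, when no b-item wins
theorem inner_fold_empty_nil (b : List (Int × Int)) (p : Int × Int)
    (h : b.filter (fun q => decide (q.1 < p.1)) = []) :
    b.foldl (fun (w : PySem.Dict String Int) q =>
        if p.1 > q.1 then w.modify "win" 0 (fun t => t + q.2 * p.2) else w)
      PySem.Dict.empty = PySem.Dict.empty := by
  rw [foldl_dif_eq_filter b (fun q => p.1 > q.1)
    (fun (w : PySem.Dict String Int) q => w.modify "win" 0 (fun t => t + q.2 * p.2))]
  rw [show (fun q => decide (p.1 > q.1)) = (fun (q : Int × Int) => decide (q.1 < p.1)) from rfl, h]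
  rfl

theorem winSum_eq_zero_of_filter_nil (b : List (Int × Int)) (p : Int × Int)
    (h : b.filter (fun q => decide (q.1 < p.1)) = []) : winSum b p = 0 := by
  simp [winSum, h]

-- A's outer loop from a singleton "win" state adds every a-item's contribution
theorem outer_fold_singleton (b : List (Int × Int)) :
    ∀ (a : List (Int × Int)) (s : Int),
      a.foldl (fun w p => b.foldl (fun (w : PySem.Dict String Int) q =>
          if p.1 > q.1 then w.modify "win" 0 (fun t => t + q.2 * p.2) else w) w)
        (PySem.Dict.mk [("win", s)]) = PySem.Dict.mk [("win", s + (a.map (winSum b)).sum)] := by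
  intro a
  induction a with
  | nil => intro s; simp
  | cons p a ih =>
      intro s
      rw [List.foldl_cons, inner_fold_singleton, ih (s + winSum b p)]
      have h2 : s + winSum b p + (a.map (winSum b)).sum = s + ((p :: a).map (winSum b)).sum := by
        simp; ring
      rw [h2]

-- A's outer loop from the untouched dict
theorem outer_fold_empty (b : List (Int × Int)) :
    ∀ (a : List (Int × Int)),
      a.foldl (fun w p => b.foldl (fun (w : PySem.Dict String Int) q =>
          if p.1 > q.1 then w.modify "win" 0 (fun t => t + q.2 * p.2) else w) w)
        PySem.Dict.empty
      = if ∀ p ∈ a, b.filter (fun q => decide (q.1 < p.1)) = [] then PySem.Dict.empty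
        else PySem.Dict.mk [("win", (a.map (winSum b)).sum)] := by
  intro a
  induction a with
  | nil => simp
  | cons p a ih =>
      rw [List.foldl_cons]
      by_cases hp : b.filter (fun q => decide (q.1 < p.1)) = []
      · rw [inner_fold_empty_nil b p hp, ih]
        by_cases hrest : ∀ p' ∈ a, b.filter (fun q => decide (q.1 < p'.1)) = []
        · have hall : ∀ p' ∈ p :: a, b.filter (fun q => decide (q.1 < p'.1)) = [] := by
            intro p' hp'
            rcases List.mem_cons.mp hp' with h | h
            · subst h; exact hp
            · exact hrest p' h
          rw [if_pos hrest, if_pos hall]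
        · have hnall : ¬ ∀ p' ∈ p :: a, b.filter (fun q => decide (q.1 < p'.1)) = [] := by
            intro hall; exact hrest (fun p' hp' => hall p' (List.mem_cons_of_mem p hp'))
          rw [if_neg hrest, if_neg hnall]
          congr 2
          have hz : winSum b p = 0 := winSum_eq_zero_of_filter_nil b p hp
          simp [hz]
      · rw [inner_fold_empty b p hp, outer_fold_singleton]
        have hnall : ¬ ∀ p' ∈ p :: a, b.filter (fun q => decide (q.1 < p'.1)) = [] := by
          intro hall; exact hp (hall p List.mem_cons_self)
        rw [if_neg hnall]
        simp

-- characterization of A's result when some pair wins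
theorem A_char (a b : List (Int × Int)) (ha : (a.map Prod.fst).Nodup) (hb : (b.map Prod.fst).Nodup)
    (hw : ¬ D_compare_count a b) :
    compare_count a b =
      [("win", (a.map (fun p => p.2 * ((b.filter (fun q => decide (q.1 < p.1))).map Prod.snd).sum)).sum)] := by
  obtain ⟨p0, hp0, q0, hq0, hlt0⟩ : ∃ p ∈ a, ∃ q ∈ b, q.1 < p.1 := by
    by_contra hno
    exact hw (fun p hp q hq hlt => hno ⟨p, hp, q, hq, hlt⟩)
  simp only [compare_count]
  rw [dict_items_of_nodup a ha, dict_items_of_nodup b hb, outer_fold_empty]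
  have hnall : ¬ ∀ p ∈ a, b.filter (fun q => decide (q.1 < p.1)) = [] := by
    intro hall
    have hmem : q0 ∈ b.filter (fun q => decide (q.1 < p0.1)) :=
      List.mem_filter.mpr ⟨hq0, by simpa using hlt0⟩
    exact List.ne_nil_of_mem hmem (hall p0 hp0)
  rw [if_neg hnall]
  refine congrArg (fun t => [("win", t)]) ?_
  refine congrArg List.sum (List.map_congr_left ?_)
  intro p _
  rw [winSum, List.sum_map_mul_right, mul_comm]

-- characterization of A's result when no pair wins (distinct keys)
theorem A_char_D (a b : List (Int × Int)) (ha : (a.map Prod.fst).Nodup) (hb : (b.map Prod.fst).Nodup)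
    (hD : D_compare_count a b) : compare_count a b = [] := by
  simp only [compare_count]
  rw [dict_items_of_nodup a ha, dict_items_of_nodup b hb, outer_fold_empty]
  have hall : ∀ p ∈ a, b.filter (fun q => decide (q.1 < p.1)) = [] := by
    intro p hp
    rw [List.filter_eq_nil_iff]
    intro q hq
    simpa using hD p hp q hq
  rw [if_pos hall]
  rfl

-- sortedness of the B-side pairs: keys are (non-strictly) monotone by position
theorem sorted_key_mono (b : List (Int × Int)) :
    ∀ i j (hi : i < (PySem.List.sorted b (fun kv => kv.1)).length)
      (hj : j < (PySem.List.sorted b (fun kv => kv.1)).length), i ≤ j →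
      (PySem.List.sorted b (fun kv => kv.1))[i].1 ≤ (PySem.List.sorted b (fun kv => kv.1))[j].1 := by
  intro i j hi hj hij
  rcases Nat.lt_or_ge i j with hlt | hge
  · exact (List.pairwise_iff_getElem.mp
      (PySem.List.sorted_pairwise b (fun kv => kv.1))) i j hi hj hlt
  · have : i = j := by omega
    subst this; exact le_refl _

-- the partial-sums list built by Source B's first loop
def psums (L : List (Int × Int)) (s : Int) : List Int :=
  match L with
  | [] => []
  | q :: t => (s + q.2) :: psums t (s + q.2)

theorem prefix_fold (L : List (Int × Int)) :
    ∀ (pr : List Int) (s : Int),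
      (L.foldl (fun (st : List Int × Int) q => (st.1 ++ [st.2 + q.2], st.2 + q.2)) (pr, s)).1
        = pr ++ psums L s := by
  induction L with
  | nil => intro pr s; simp [psums]
  | cons q t ih =>
      intro pr s
      simp only [List.foldl_cons, psums, ih]
      simp

theorem psums_length (L : List (Int × Int)) : ∀ s, (psums L s).length = L.length := by
  induction L with
  | nil => intro s; rfl
  | cons q t ih => intro s; simp [psums, ih]

theorem psums_getElem (L : List (Int × Int)) :
    ∀ (s : Int) (i : Nat) (h : i < L.length),
      (psums L s)[i]'((psums_length L s).symm ▸ h) = s + ((L.take (i + 1)).map Prod.snd).sum := by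
  induction L with
  | nil => intro s i h; simp at h
  | cons q t ih =>
      intro s i h
      cases i with
      | zero => simp [psums]
      | succ i =>
          have h' : i < t.length := by simpa using h
          have hps := ih (s + q.2) i h'
          simp only [psums, List.getElem_cons_succ, hps, List.take_succ_cons, List.map_cons,
            List.sum_cons]
          ring

-- a filter whose true-set is exactly the first m positions is a take
theorem filter_eq_take_of_boundary {α : Type} (w : α → Bool) :
    ∀ (L : List α) (m : Nat), m ≤ L.length →
      (∀ i (h : i < L.length), i < m → w L[i]) →
      (∀ i (h : i < L.length), m ≤ i → ¬ w L[i]) →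
      L.filter w = L.take m := by
  intro L
  induction L with
  | nil => intro m hm _ _; simp at hm; simp [hm]
  | cons x t ih =>
      intro m hm h1 h2
      cases m with
      | zero =>
          simp only [List.take_zero]
          rw [List.filter_eq_nil_iff]
          intro a ha
          rcases List.mem_iff_getElem.mp ha with ⟨i, hi, rfl⟩
          exact h2 i hi (Nat.zero_le i)
      | succ m =>
          have hx : w x := h1 0 (by simp) (Nat.succ_pos m)
          have ht : t.filter w = t.take m := by
            apply ih m (by simpa using hm)
            · intro i hi him
              have := h1 (i + 1) (by simpa using hi) (by omega)
              simpa using this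
            · intro i hi him
              have := h2 (i + 1) (by simpa using hi) (by omega)
              simpa using this
          simp [hx, ht]

-- binary-search invariant: the result is a boundary index for the predicate (·.1 < key)
theorem bsearch_bound (pairs : List (Int × Int)) (key : Int)
    (hmono : ∀ i j (hi : i < pairs.length) (hj : j < pairs.length), i ≤ j →
      pairs[i].1 ≤ pairs[j].1) :
    ∀ (n lo hi : Nat), hi - lo ≤ n → lo ≤ hi → hi ≤ pairs.length →
      (∀ i (h : i < pairs.length), i < lo → pairs[i].1 < key) →
      (∀ i (h : i < pairs.length), hi ≤ i → ¬ pairs[i].1 < key) →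
      bsearchGo pairs key n lo hi ≤ pairs.length ∧
      (∀ i (h : i < pairs.length), i < bsearchGo pairs key n lo hi → pairs[i].1 < key) ∧
      (∀ i (h : i < pairs.length), bsearchGo pairs key n lo hi ≤ i → ¬ pairs[i].1 < key) := by
  intro n
  induction n with
  | zero =>
      intro lo hi hn hlh hhl h1 h2
      have : lo = hi := by omega
      subst this
      simp only [bsearchGo]
      exact ⟨le_trans hlh hhl, h1, h2⟩
  | succ n ih =>
      intro lo hi hn hlh hhl h1 h2
      simp only [bsearchGo]
      by_cases h : lo < hi
      · simp only [h, if_pos]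
        have hmidlt : (lo + hi) / 2 < pairs.length := by omega
        have hget : PySem.List.pyGetD pairs (((lo + hi) / 2 : Nat) : Int) (0, 0)
            = pairs[(lo + hi) / 2] := by
          rw [PySem.List.pyGetD_natCast]
          exact List.getD_eq_getElem pairs (0, 0) hmidlt
        rw [hget]
        by_cases hc : pairs[(lo + hi) / 2].1 < key
        · simp only [hc, if_pos]
          apply ih ((lo + hi) / 2 + 1) hi (by omega) (by omega) hhl
          · intro i hilen hi'
            by_cases hcase : i < lo
            · exact h1 i hilen hcase
            · have hle : i ≤ (lo + hi) / 2 := by omega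
              exact lt_of_le_of_lt (hmono i _ hilen hmidlt hle) hc
          · exact h2
        · simp only [hc, if_neg, not_false_iff]
          apply ih lo ((lo + hi) / 2) (by omega) (by omega) (by omega) h1
          · intro i hilen hi' hlt
            exact hc (lt_of_le_of_lt (hmono _ i hmidlt hilen hi') hlt)
      · simp only [h, if_neg, not_false_iff]
        have : lo = hi := by omega
        subst this
        exact ⟨le_trans hlh hhl, h1, h2⟩

-- the wrapped loop satisfies the same boundary facts
theorem bsearchLoop_bound (pairs : List (Int × Int)) (key : Int)
    (hmono : ∀ i j (hi : i < pairs.length) (hj : j < pairs.length), i ≤ j →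
      pairs[i].1 ≤ pairs[j].1) :
    bsearchLoop pairs key 0 pairs.length ≤ pairs.length ∧
    (∀ i (h : i < pairs.length), i < bsearchLoop pairs key 0 pairs.length → pairs[i].1 < key) ∧
    (∀ i (h : i < pairs.length), bsearchLoop pairs key 0 pairs.length ≤ i → ¬ pairs[i].1 < key) := by
  have := bsearch_bound pairs key hmono (pairs.length - 0) 0 pairs.length (by omega)
    (Nat.zero_le _) (le_refl _)
    (fun i h hi0 => absurd hi0 (Nat.not_lt_zero i))
    (fun i h hil => absurd h (by omega))
  simpa [bsearchLoop] using this

-- reading the prefix-sum list at a boundary index gives the prefix value sum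
theorem psums_read (P : List (Int × Int)) (r : Nat) (hr : r ≤ P.length) :
    ([0] ++ psums P 0 : List Int)[r]'(by simp [psums_length]; omega)
      = ((P.take r).map Prod.snd).sum := by
  cases r with
  | zero => simp
  | succ i =>
      have hi : i < P.length := by omega
      have hps := psums_getElem P 0 i hi
      have hidx : ([0] ++ psums P 0 : List Int)[i + 1]'(by simp [psums_length]; omega)
          = (psums P 0)[i]'(by rw [psums_length]; omega) := by
        simp
      rw [hidx, hps, zero_add]

-- the per-key lookup of B equals the filtered value sum over b
theorem lookup_eq_filter_sum (b : List (Int × Int)) (x : Int) :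
    PySem.List.pyGetD
        ((PySem.List.sorted b (fun kv => kv.1)).foldl
          (fun (st : List Int × Int) q => (st.1 ++ [st.2 + q.2], st.2 + q.2)) ([0], 0)).1
        ((bsearchLoop (PySem.List.sorted b (fun kv => kv.1)) x 0
            (PySem.List.sorted b (fun kv => kv.1)).length : Nat) : Int) 0
      = ((b.filter (fun q => decide (q.1 < x))).map Prod.snd).sum := by
  set P := PySem.List.sorted b (fun kv => kv.1) with hPdef
  obtain ⟨hrlen, hlt, hge⟩ := bsearchLoop_bound P x (sorted_key_mono b)
  set r := bsearchLoop P x 0 P.length with hrdef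
  have hfil : P.filter (fun q => decide (q.1 < x)) = P.take r := by
    apply filter_eq_take_of_boundary _ P r hrlen
    · intro i h hir
      simpa using hlt i h hir
    · intro i h hri
      simpa using hge i h hri
  rw [prefix_fold P [0] 0, PySem.List.pyGetD_natCast]
  have hlen : ([0] ++ psums P 0 : List Int).length = P.length + 1 := by
    simp [psums_length]
  rw [List.getD_eq_getElem _ 0 (by omega)]
  rw [psums_read P r hrlen, ← hfil]
  have hperm : (P.filter (fun q => decide (q.1 < x))).Perm (b.filter (fun q => decide (q.1 < x))) :=
    (PySem.List.sorted_perm b (fun kv => kv.1) false).filter _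
  exact (hperm.map Prod.snd).sum_eq

-- characterization of B's result
theorem B_char (a b : List (Int × Int)) :
    compare_count_alt a b =
      [("win", (a.map (fun p => p.2 * ((b.filter (fun q => decide (q.1 < p.1))).map Prod.snd).sum)).sum)] := by
  simp only [compare_count_alt]
  rw [PySem.List.foldl_add, zero_add]
  refine congrArg (fun t => [("win", t)]) ?_
  refine congrArg List.sum (List.map_congr_left ?_)
  intro p _
  rw [lookup_eq_filter_sum b p.1]

-- ===== VERDICT (by name: the statement is the Claim_ definition above) =====
theorem compare_count_spec : Claim_unchanged_compare_count := by
  intro a b _hdom hpre hD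
  rw [A_char a b hpre.1 hpre.2 hD, B_char a b]

theorem compare_count_changed : Claim_changed_compare_count := by
  unfold Claim_changed_compare_count
  refine ⟨by decide, by decide, by decide, ?_, ?_, by decide⟩
  · rw [A_char_D _ _ (by decide) (by decide) (by decide)]
    rfl
  · rw [B_char]
    norm_num [pvDiffWitness_compare_count, pvDiffWitnessOut_compare_count, List.filter]

theorem compare_count_tight : Claim_exact_compare_count := by
  intro a b _hdom hpre hD
  rw [A_char_D a b hpre.1 hpre.2 hD, B_char a b]
  simp
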